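-- pv_equiv track=rewrite | github.com/Julien-pour/arc_example | others_examples/32b_gen1-solved_gen2-failed/868de0fa/task.py | transform
-- ===== SOURCE A (Python) =====
-- def transform(grid):
--
--     def fill_middle_with_2s_or_7s(grid, start_row, end_row, start_col, end_col, fill_value):
--         for i in range(start_row + 1, end_row):
--             for j in range(start_col + 1, end_col):
--                 grid[i][j] = fill_value
--     rows = len(grid)
--     cols = len(grid[0])
--     for i in range(rows):
--         for j in range(cols):
--             if grid[i][j] == 1:
--                 start_row = i
--                 while start_row > 0 and grid[start_row - 1][j] == 1:
--                     start_row -= 1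
--                 end_row = i
--                 while end_row < rows - 1 and grid[end_row + 1][j] == 1:
--                     end_row += 1
--                 start_col = j
--                 while start_col > 0 and grid[i][start_col - 1] == 1:
--                     start_col -= 1
--                 end_col = j
--                 while end_col < cols - 1 and grid[i][end_col + 1] == 1:
--                     end_col += 1
--                 if end_row - start_row > 1 and end_col - start_col > 1:
--                     fill_value = 7 if (end_row - start_row) % 2 == 0 and (end_col - start_col) % 2 == 0 else 2
--                     fill_middle_with_2s_or_7s(grid, start_row, end_row, start_col, end_col, fill_value)
--     return grid
-- ===== SOURCE B (Python) =====
-- # Different algorithm: instead of walking the grid cell-by-cell in four directions from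
-- # every 1-cell, B maintains explicit per-column / per-row sets of "blocked" coordinates
-- # (cells whose current value is not 1, plus -1/size sentinels); each extent is obtained
-- # as predecessor/successor in the relevant blocked set, and fills update the blocked sets
-- # and a value overlay.  A mutates its argument in place and returns it; B leaves the
-- # argument untouched -- the equivalence is about the RETURN value.
-- def transform(grid):
--     rows = len(grid)
--     cols = len(grid[0])
--     col_blocked = [{-1, rows} | {r for r in range(rows) if grid[r][j] != 1}
--                    for j in range(cols)]
--     row_blocked = [{-1, cols} | {c for c in range(cols) if grid[i][c] != 1}
--                    for i in range(rows)]
--     fills = {}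
--     for i in range(rows):
--         for j in range(cols):
--             if grid[i][j] == 1 and (i, j) not in fills:
--                 start_row = max(r for r in col_blocked[j] if r < i) + 1
--                 end_row = min(r for r in col_blocked[j] if r > i) - 1
--                 start_col = max(c for c in row_blocked[i] if c < j) + 1
--                 end_col = min(c for c in row_blocked[i] if c > j) - 1
--                 if end_row - start_row > 1 and end_col - start_col > 1:
--                     v = 7 if (end_row - start_row) % 2 == 0 and (end_col - start_col) % 2 == 0 else 2
--                     for r in range(start_row + 1, end_row):
--                         for c in range(start_col + 1, end_col):
--                             fills[(r, c)] = v
--                             col_blocked[c].add(r)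
--                             row_blocked[r].add(c)
--     return [[fills.get((i, j), x) for j, x in enumerate(row)]
--             for i, row in enumerate(grid)]
-- ===== Notes on version B (the rewrite author's own statement) =====
-- stated objective: alternative
-- what changed: B replaces A's four per-cell directional walks by per-column/per-row sets of blocked coordinates (cells currently != 1, plus sentinels): each extent is a predecessor/successor query over those sets, fills update the blocked sets and a value overlay, and the argument is never mutated (A mutates it in place; return values are equal).
-- outside the precondition, e.g. on transform([]): A raises IndexError, B raises IndexError; on transform([[1, 1], [1]]): A raises IndexError, B raises IndexError
import Mathlib
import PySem

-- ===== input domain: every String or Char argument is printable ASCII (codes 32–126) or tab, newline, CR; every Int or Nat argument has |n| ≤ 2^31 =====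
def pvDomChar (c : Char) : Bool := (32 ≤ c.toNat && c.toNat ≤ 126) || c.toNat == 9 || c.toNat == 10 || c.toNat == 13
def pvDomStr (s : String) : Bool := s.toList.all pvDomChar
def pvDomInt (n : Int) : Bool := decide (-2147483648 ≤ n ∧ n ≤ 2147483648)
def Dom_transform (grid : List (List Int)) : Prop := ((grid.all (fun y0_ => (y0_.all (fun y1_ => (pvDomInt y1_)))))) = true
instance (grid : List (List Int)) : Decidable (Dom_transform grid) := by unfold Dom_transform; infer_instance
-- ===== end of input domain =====

-- B replaces A's four per-cell directional walks by per-column / per-row sets of blocked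
-- coordinates (cells whose current value is not 1, plus -1/size sentinels): each extent is
-- a predecessor / successor query over those sets, and fills update the blocked sets and a
-- value overlay.  A mutates its argument in place and returns it; B leaves the argument
-- untouched — the equivalence proved is about the RETURN value.

-- ===== PORT A =====
-- grid[i][j] (always in range where A evaluates it under Pre_)
def cellA (g : List (List Int)) (i j : Nat) : Int := (g.getD i []).getD j 0

-- grid[i][j] = v
def setA (g : List (List Int)) (i j : Nat) (v : Int) : List (List Int) :=
  g.set i ((g.getD i []).set j v)

-- while s > 0 and <cell s-1 is 1>: s -= 1       (A's two upward/leftward while loops)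
def walkUp (p : Nat → Bool) : Nat → Nat
  | 0 => 0
  | k+1 => if p k then walkUp p k else k + 1

-- while e < limit and <cell e+1 is 1>: e += 1   (fuel = limit - e; A's two downward/rightward loops)
def walkDown (p : Nat → Bool) : Nat → Nat → Nat
  | 0, e => e
  | f+1, e => if p (e+1) then walkDown p f (e+1) else e

-- fill_middle_with_2s_or_7s: for i in range(sr+1, er): for j in range(sc+1, ec): grid[i][j] = v
def fillA (g : List (List Int)) (sr er sc ec : Nat) (v : Int) : List (List Int) :=
  (List.range' (sr+1) (er - (sr+1))).foldl
    (fun g i => (List.range' (sc+1) (ec - (sc+1))).foldl (fun g j => setA g i j v) g) g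

-- body of the double scan loop
def stepA (rows cols : Nat) (g : List (List Int)) (i j : Nat) : List (List Int) :=
  if cellA g i j == 1 then
    let sr := walkUp (fun r => cellA g r j == 1) i
    let er := walkDown (fun r => cellA g r j == 1) (rows - 1 - i) i
    let sc := walkUp (fun c => cellA g i c == 1) j
    let ec := walkDown (fun c => cellA g i c == 1) (cols - 1 - j) j
    if 1 < er - sr ∧ 1 < ec - sc then
      fillA g sr er sc ec (if (er - sr) % 2 = 0 ∧ (ec - sc) % 2 = 0 then 7 else 2)
    else g
  else g

def transform (grid : List (List Int)) : List (List Int) :=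
  let rows := grid.length
  let cols := (grid.headD []).length
  (List.range rows).foldl
    (fun g i => (List.range cols).foldl (fun g j => stepA rows cols g i j) g) grid

-- ===== PORT B =====
-- B reads grid[i][j] of the ORIGINAL (never mutated) grid: same indexing helper cellA

-- col_blocked = [{-1, rows} | {r for r in range(rows) if grid[r][j] != 1} for j in range(cols)]
def colBlocked (grid : List (List Int)) (rows cols : Nat) : List (PySem.Set Int) :=
  (List.range cols).map (fun j =>
    PySem.Set.union (PySem.Set.ofList [(-1 : Int), (rows : Int)])
      (PySem.Set.ofList (((List.range rows).filter (fun r => !(cellA grid r j == 1))).map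
        (fun r : Nat => (r : Int)))))

-- row_blocked = [{-1, cols} | {c for c in range(cols) if grid[i][c] != 1} for i in range(rows)]
def rowBlocked (grid : List (List Int)) (rows cols : Nat) : List (PySem.Set Int) :=
  (List.range rows).map (fun i =>
    PySem.Set.union (PySem.Set.ofList [(-1 : Int), (cols : Int)])
      (PySem.Set.ofList (((List.range cols).filter (fun c => !(cellA grid i c == 1))).map
        (fun c : Nat => (c : Int)))))

-- max(x for x in s if x < t)  (never empty: -1 is a sentinel member; the getD default is unreachable)
def predMax (s : PySem.Set Int) (t : Int) : Int :=
  (PySem.List.max? (s.filter (fun x => decide (x < t))) (fun x => x)).getD 0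

-- min(x for x in s if x > t)  (never empty: the size sentinel; the getD default is unreachable)
def succMin (s : PySem.Set Int) (t : Int) : Int :=
  (PySem.List.min? (s.filter (fun x => decide (t < x))) (fun x => x)).getD 0

-- fills[(r, c)] = v; col_blocked[c].add(r); row_blocked[r].add(c)
-- (r, c are nonnegative here, so .toNat is Python's list indexing exactly)
def fillCell (v : Int)
    (st : PySem.Dict (Int × Int) Int × List (PySem.Set Int) × List (PySem.Set Int))
    (r c : Int) :
    PySem.Dict (Int × Int) Int × List (PySem.Set Int) × List (PySem.Set Int) :=
  (st.1.insert (r, c) v,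
   st.2.1.set c.toNat (PySem.Set.add (st.2.1.getD c.toNat []) r),
   st.2.2.set r.toNat (PySem.Set.add (st.2.2.getD r.toNat []) c))

-- body of B's double scan loop
def stepB (grid : List (List Int))
    (st : PySem.Dict (Int × Int) Int × List (PySem.Set Int) × List (PySem.Set Int))
    (i j : Nat) :
    PySem.Dict (Int × Int) Int × List (PySem.Set Int) × List (PySem.Set Int) :=
  if cellA grid i j == 1 && (st.1.get? ((i : Int), (j : Int))).isNone then
    let sr := predMax (st.2.1.getD j []) (i : Int) + 1
    let er := succMin (st.2.1.getD j []) (i : Int) - 1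
    let sc := predMax (st.2.2.getD i []) (j : Int) + 1
    let ec := succMin (st.2.2.getD i []) (j : Int) - 1
    if 1 < er - sr ∧ 1 < ec - sc then
      let v : Int := if PySem.Int.mod (er - sr) 2 = 0 ∧ PySem.Int.mod (ec - sc) 2 = 0 then 7 else 2
      (PySem.List.pyRange (sr + 1) er 1).foldl (fun st r =>
        (PySem.List.pyRange (sc + 1) ec 1).foldl (fun st c => fillCell v st r c) st) st
    else st
  else st

def transform_alt (grid : List (List Int)) : List (List Int) :=
  let rows := grid.length
  let cols := (grid.headD []).length
  let final := (List.range rows).foldl (fun st i =>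
      (List.range cols).foldl (fun st j => stepB grid st i j) st)
    (PySem.Dict.empty, colBlocked grid rows cols, rowBlocked grid rows cols)
  grid.mapIdx (fun i row => row.mapIdx (fun j x => final.1.getD ((i : Int), (j : Int)) x))

-- ===== PRECONDITION & SPEC =====
-- Pre_ excludes exactly the inputs where Python A raises IndexError: the empty grid
-- (grid[0]) and ragged grids with a row shorter than row 0 (the scan reads grid[i][j]
-- for every j < len(grid[0])).
def Pre_transform (grid : List (List Int)) : Prop :=
  grid ≠ [] ∧ ∀ r ∈ grid, (grid.headD []).length ≤ r.length

instance (grid : List (List Int)) : Decidable (Pre_transform grid) := by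
  unfold Pre_transform; infer_instance

def pvWitness_transform : List (List Int) := [[1, 1, 1], [1, 0, 1], [1, 1, 1]]

def Spec_transform (grid : List (List Int)) (out : List (List Int)) : Prop := out = transform_alt grid
instance (grid : List (List Int)) (out : List (List Int)) : Decidable (Spec_transform grid out) := by unfold Spec_transform; infer_instance

-- ===== CLAIM (what is proved, stated in full; the proofs are below) =====
def Claim_equal_transform : Prop := ∀ (grid : List (List Int)), Dom_transform grid → Pre_transform grid → Spec_transform grid (transform grid)

-- ===== LEMMAS AND PROOFS =====

-- the overlay applied to the original grid (this is B's final assembly)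
def ovApply (grid : List (List Int)) (d : PySem.Dict (Int × Int) Int) : List (List Int) :=
  grid.mapIdx (fun i row => row.mapIdx (fun j x => d.getD ((i : Int), (j : Int)) x))

-- the "this cell currently blocks a run" test, phrased on B's state
def blkB (grid : List (List Int)) (d : PySem.Dict (Int × Int) Int) (i j : Nat) : Bool :=
  !((cellA grid i j == 1) && (d.get? ((i : Int), (j : Int))).isNone)

-- overlay invariant: every filled key is a nat-cast pair in range and its value is never 1
def InvF (grid : List (List Int)) (cols : Nat) (d : PySem.Dict (Int × Int) Int) : Prop :=
  ∀ p v, d.get? p = some v →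
    (∃ a b : Nat, p = ((a : Int), (b : Int)) ∧ a < grid.length ∧ b < cols) ∧ v ≠ 1

-- blocked-set invariants: the per-column / per-row sets hold exactly the blocked coordinates
def ColInv (grid : List (List Int)) (cols : Nat) (d : PySem.Dict (Int × Int) Int)
    (cb : List (PySem.Set Int)) : Prop :=
  cb.length = cols ∧ ∀ j, j < cols → ∀ x : Int,
    (x ∈ cb.getD j [] ↔ x = -1 ∨ x = (grid.length : Int) ∨
      ∃ r : Nat, r < grid.length ∧ x = (r : Int) ∧ blkB grid d r j = true)

def RowInv (grid : List (List Int)) (cols : Nat) (d : PySem.Dict (Int × Int) Int)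
    (rb : List (PySem.Set Int)) : Prop :=
  rb.length = grid.length ∧ ∀ i, i < grid.length → ∀ x : Int,
    (x ∈ rb.getD i [] ↔ x = -1 ∨ x = (cols : Int) ∨
      ∃ c : Nat, c < cols ∧ x = (c : Int) ∧ blkB grid d i c = true)

-- ---- pointwise facts about ovApply / setA ----

theorem mapIdx_ext {a b : Type} (l : List a) (f g : Nat → a → b)
    (h : ∀ m x, l[m]? = some x → f m x = g m x) : l.mapIdx f = l.mapIdx g := by
  apply List.ext_getElem?
  intro m
  rw [List.getElem?_mapIdx, List.getElem?_mapIdx]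
  cases hm : l[m]? with
  | none => rfl
  | some x => simp [h m x hm]

theorem getD_eq_getElem' {a : Type} (l : List a) (n : Nat) (dflt : a) (h : n < l.length) :
    l.getD n dflt = l[n] := by
  rw [List.getD_eq_getElem?_getD, List.getElem?_eq_getElem h]
  rfl

theorem length_ovApply (grid : List (List Int)) (d : PySem.Dict (Int × Int) Int) :
    (ovApply grid d).length = grid.length := by
  simp [ovApply]

theorem getElem?_ovApply (grid : List (List Int)) (d : PySem.Dict (Int × Int) Int) (i : Nat) :
    (ovApply grid d)[i]? = (grid[i]?).map (fun row => row.mapIdx (fun j x => d.getD ((i : Int), (j : Int)) x)) := by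
  simp [ovApply, List.getElem?_mapIdx]

theorem getD_ovApply (grid : List (List Int)) (d : PySem.Dict (Int × Int) Int) (i : Nat)
    (hi : i < grid.length) :
    (ovApply grid d).getD i [] = (grid.getD i []).mapIdx (fun j x => d.getD ((i : Int), (j : Int)) x) := by
  have h1 : i < (ovApply grid d).length := by rw [length_ovApply]; exact hi
  rw [getD_eq_getElem' _ _ _ h1, getD_eq_getElem' _ _ _ hi]
  have h2 := getElem?_ovApply grid d i
  rw [List.getElem?_eq_getElem h1, List.getElem?_eq_getElem hi, Option.map_some] at h2
  exact Option.some_inj.mp h2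

theorem cell_ovApply (grid : List (List Int)) (d : PySem.Dict (Int × Int) Int) (i j : Nat)
    (hi : i < grid.length) (hj : j < (grid.getD i []).length) :
    cellA (ovApply grid d) i j = d.getD ((i : Int), (j : Int)) (cellA grid i j) := by
  unfold cellA
  rw [getD_ovApply grid d i hi,
    getD_eq_getElem' _ _ _ (by simpa using hj), getD_eq_getElem' _ _ _ hj,
    List.getElem_mapIdx]

theorem getElem?_setA (g : List (List Int)) (i j : Nat) (v : Int) (i' : Nat) :
    (setA g i j v)[i']? =
      if i' = i ∧ i < g.length then some ((g.getD i []).set j v) else g[i']? := by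
  unfold setA
  by_cases h : i' = i ∧ i < g.length
  · obtain ⟨rfl, hlt⟩ := h
    rw [if_pos ⟨rfl, hlt⟩, List.getElem?_set_self (by simpa using hlt),
      getD_eq_getElem' _ _ _ hlt]
  · rw [if_neg h]
    rcases Decidable.em (i' = i) with rfl | hne
    · have hge : g.length ≤ i' := by
        by_contra hc
        exact h ⟨rfl, by omega⟩
      rw [List.getElem?_eq_none (by simpa using hge), List.getElem?_eq_none hge]
    · exact List.getElem?_set_ne (by omega)

theorem mem_getD_of_lt (grid : List (List Int)) (i : Nat) (hi : i < grid.length) :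
    grid.getD i [] ∈ grid := by
  rw [getD_eq_getElem' _ _ _ hi]
  exact List.getElem_mem hi

-- one dict insert = one in-place cell write, through the overlay
theorem ovApply_insert (grid : List (List Int)) (d : PySem.Dict (Int × Int) Int) (i j : Nat)
    (v : Int) (hi : i < grid.length) (hj : j < (grid.getD i []).length) :
    ovApply grid (d.insert ((i : Int), (j : Int)) v) = setA (ovApply grid d) i j v := by
  apply List.ext_getElem?
  intro n
  rw [getElem?_ovApply, getElem?_setA, length_ovApply]
  by_cases hn : n = i ∧ i < grid.length
  · obtain ⟨rfl, _⟩ := hn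
    rw [if_pos ⟨rfl, hi⟩, List.getElem?_eq_getElem hi, Option.map_some, Option.some_inj,
      getD_ovApply grid d n hi]
    rw [getD_eq_getElem' grid n [] hi] at hj
    rw [getD_eq_getElem' grid n [] hi]
    apply List.ext_getElem?
    intro m
    rw [List.getElem?_mapIdx]
    by_cases hm : m = j
    · subst hm
      rw [List.getElem?_set_self (by simpa using hj), List.getElem?_eq_getElem hj,
        Option.map_some, Option.some_inj, PySem.Dict.getD_insert, if_pos rfl]
    · rw [List.getElem?_set_ne (by omega), List.getElem?_mapIdx]
      cases h2 : grid[n][m]? with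
      | none => rfl
      | some x =>
        rw [Option.map_some, Option.map_some, Option.some_inj, PySem.Dict.getD_insert,
          if_neg (by simp [Prod.ext_iff]; omega)]
  · rw [if_neg hn, getElem?_ovApply]
    rcases Decidable.em (n = i) with rfl | hne
    · exact absurd ⟨rfl, hi⟩ hn
    · cases hg : grid[n]? with
      | none => rfl
      | some row =>
        rw [Option.map_some, Option.map_some, Option.some_inj]
        apply mapIdx_ext
        intro m x _
        rw [PySem.Dict.getD_insert, if_neg (by simp [Prod.ext_iff]; omega)]

-- ---- the "cell is 1" test agrees across the overlay ----

theorem cell_iff (grid : List (List Int)) (cols : Nat) (d : PySem.Dict (Int × Int) Int)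
    (hw : ∀ r ∈ grid, cols ≤ r.length) (hInv : InvF grid cols d) (i j : Nat)
    (hi : i < grid.length) (hj : j < cols) :
    (cellA (ovApply grid d) i j == 1) = !(blkB grid d i j) := by
  have hj' : j < (grid.getD i []).length :=
    lt_of_lt_of_le hj (hw _ (mem_getD_of_lt grid i hi))
  rw [cell_ovApply grid d i j hi hj']
  unfold blkB
  cases hd : d.get? ((i : Int), (j : Int)) with
  | none =>
    rw [PySem.Dict.getD_of_get?_eq_none d _ hd]
    simp
  | some v =>
    rw [PySem.Dict.getD_of_get?_eq_some d _ hd]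
    have hv : v ≠ 1 := (hInv _ _ hd).2
    simp [hv]

-- ---- walk characterisations (A's four while loops) ----

theorem walkUp_le (p : Nat → Bool) : ∀ i, walkUp p i ≤ i
  | 0 => le_refl 0
  | k+1 => by
    rw [walkUp]
    split
    · exact le_trans (walkUp_le p k) (by omega)
    · exact le_refl _

theorem walkUp_run (p : Nat → Bool) : ∀ i r, walkUp p i ≤ r → r < i → p r = true
  | 0, r, _, h2 => absurd h2 (by omega)
  | k+1, r, h1, h2 => by
    rw [walkUp] at h1
    by_cases hc : p k = true
    · rw [if_pos hc] at h1
      rcases Nat.lt_or_ge r k with h | h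
      · exact walkUp_run p k r h1 h
      · have : r = k := by omega
        subst this; exact hc
    · rw [if_neg hc] at h1
      omega

theorem walkUp_stop (p : Nat → Bool) : ∀ i, walkUp p i = 0 ∨ p (walkUp p i - 1) = false
  | 0 => Or.inl rfl
  | k+1 => by
    rw [walkUp]
    by_cases hc : p k = true
    · rw [if_pos hc]; exact walkUp_stop p k
    · rw [if_neg hc]
      right
      simpa using Bool.eq_false_iff.mpr hc

theorem walkDown_ge (p : Nat → Bool) : ∀ f e, e ≤ walkDown p f e
  | 0, e => le_refl e
  | f+1, e => by
    rw [walkDown]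
    split
    · exact le_trans (by omega) (walkDown_ge p f (e+1))
    · exact le_refl e

theorem walkDown_le (p : Nat → Bool) : ∀ f e, walkDown p f e ≤ e + f
  | 0, e => le_of_eq rfl
  | f+1, e => by
    rw [walkDown]
    split
    · exact le_trans (walkDown_le p f (e+1)) (by omega)
    · omega

theorem walkDown_run (p : Nat → Bool) : ∀ f e r, e < r → r ≤ walkDown p f e → p r = true
  | 0, e, r, h1, h2 => by rw [walkDown] at h2; omega
  | f+1, e, r, h1, h2 => by
    rw [walkDown] at h2
    by_cases hc : p (e+1) = true
    · rw [if_pos hc] at h2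
      rcases Nat.lt_or_ge (e+1) r with h | h
      · exact walkDown_run p f (e+1) r h h2
      · have : r = e + 1 := by omega
        subst this; exact hc
    · rw [if_neg hc] at h2
      omega

theorem walkDown_stop (p : Nat → Bool) :
    ∀ f e, walkDown p f e = e + f ∨ p (walkDown p f e + 1) = false
  | 0, e => Or.inl rfl
  | f+1, e => by
    rw [walkDown]
    by_cases hc : p (e+1) = true
    · rw [if_pos hc]
      rcases walkDown_stop p f (e+1) with h | h
      · left; omega
      · right; exact h
    · rw [if_neg hc]
      right
      exact Bool.eq_false_iff.mpr hc

-- ---- predecessor / successor queries = A's walks ----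

theorem predMax_eq (S : PySem.Set Int) (p : Nat → Bool) (n i : Nat)
    (Hmem : ∀ x : Int, x ∈ S ↔ x = -1 ∨ x = (n : Int) ∨
      ∃ r : Nat, r < n ∧ x = (r : Int) ∧ p r = false)
    (hi : i < n) :
    predMax S (i : Int) = (walkUp p i : Int) - 1 := by
  set s := walkUp p i with hs
  have hsle : s ≤ i := walkUp_le p i
  have hmemM : ((s : Int) - 1) ∈ S.filter (fun x => decide (x < (i : Int))) := by
    rw [List.mem_filter]
    refine ⟨?_, by rw [decide_eq_true_eq]; omega⟩
    rw [Hmem]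
    rcases walkUp_stop p i with h0 | hstop
    · left; rw [← hs] at h0; rw [h0]; rfl
    · by_cases h0 : s = 0
      · left; rw [h0]; rfl
      · right; right
        exact ⟨s - 1, by omega, by omega, by rw [← hs] at hstop; exact hstop⟩
  have hub : ∀ y ∈ S.filter (fun x => decide (x < (i : Int))), y ≤ (s : Int) - 1 := by
    intro y hy
    rw [List.mem_filter, decide_eq_true_eq] at hy
    obtain ⟨hyS, hylt⟩ := hy
    rw [Hmem] at hyS
    rcases hyS with rfl | rfl | ⟨r, hrn, rfl, hpr⟩
    · have : (0 : Int) ≤ (s : Int) := by positivity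
      omega
    · have : (n : Int) < (i : Int) := hylt
      have : n < i := by exact_mod_cast this
      omega
    · have hri : r < i := by exact_mod_cast hylt
      have hrs : r < s := by
        by_contra hge
        rw [walkUp_run p i r (by omega) hri] at hpr
        cases hpr
      
      omega
  obtain ⟨m, hm⟩ : ∃ m, PySem.List.max? (S.filter (fun x => decide (x < (i : Int)))) (fun x => x) = some m := by
    cases h : PySem.List.max? (S.filter (fun x => decide (x < (i : Int)))) (fun x => x) with
    | some m => exact ⟨m, rfl⟩
    | none =>
      rw [PySem.List.max?_eq_none_iff] at h
      rw [h] at hmemM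
      cases hmemM
  have h1 := PySem.List.max?_mem hm
  have h2 := PySem.List.max?_isMax hm _ hmemM
  have h3 := hub m h1
  unfold predMax
  rw [hm]
  simp only [Option.getD_some]
  omega

theorem succMin_eq (S : PySem.Set Int) (p : Nat → Bool) (n i : Nat)
    (Hmem : ∀ x : Int, x ∈ S ↔ x = -1 ∨ x = (n : Int) ∨
      ∃ r : Nat, r < n ∧ x = (r : Int) ∧ p r = false)
    (hi : i < n) :
    succMin S (i : Int) = (walkDown p (n - 1 - i) i : Int) + 1 := by
  set e := walkDown p (n - 1 - i) i with he
  have hege : i ≤ e := walkDown_ge p (n - 1 - i) i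
  have hele : e ≤ n - 1 := by
    have := walkDown_le p (n - 1 - i) i
    omega
  have hmemM : ((e : Int) + 1) ∈ S.filter (fun x => decide ((i : Int) < x)) := by
    rw [List.mem_filter]
    refine ⟨?_, by rw [decide_eq_true_eq]; omega⟩
    rw [Hmem]
    rcases walkDown_stop p (n - 1 - i) i with h0 | hstop
    · right; left
      rw [← he] at h0
      rw [h0]
      push_cast
      omega
    · by_cases hen : e = n - 1
      · rcases Nat.lt_or_ge (e + 1) n with hlt | hge
        · right; right
          exact ⟨e + 1, hlt, by push_cast; omega, by rw [← he] at hstop; exact hstop⟩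
        · right; left
          
          omega
      · right; right
        exact ⟨e + 1, by omega, by push_cast; omega, by rw [← he] at hstop; exact hstop⟩
  have hlb : ∀ y ∈ S.filter (fun x => decide ((i : Int) < x)), (e : Int) + 1 ≤ y := by
    intro y hy
    rw [List.mem_filter, decide_eq_true_eq] at hy
    obtain ⟨hyS, hygt⟩ := hy
    rw [Hmem] at hyS
    rcases hyS with rfl | rfl | ⟨r, hrn, rfl, hpr⟩
    · have : (0 : Int) ≤ (i : Int) := by positivity
      omega
    · 
      omega
    · have hir : i < r := by exact_mod_cast hygt
      have hre : e < r := by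
        by_contra hge
        rw [walkDown_run p (n - 1 - i) i r hir (by omega)] at hpr
        cases hpr
      
      omega
  obtain ⟨m, hm⟩ : ∃ m, PySem.List.min? (S.filter (fun x => decide ((i : Int) < x))) (fun x => x) = some m := by
    cases h : PySem.List.min? (S.filter (fun x => decide ((i : Int) < x))) (fun x => x) with
    | some m => exact ⟨m, rfl⟩
    | none =>
      rw [PySem.List.min?_eq_none_iff] at h
      rw [h] at hmemM
      cases hmemM
  have h1 := PySem.List.min?_mem hm
  have h2 := PySem.List.min?_isMin hm _ hmemM
  have h3 := hlb m h1
  unfold succMin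
  rw [hm]
  simp only [Option.getD_some]
  omega

-- ---- batch updates performed by one fill ----

-- the rectangle of cells written by one fill, as one flat list (Nat coordinates)
def rectPairs (sr er sc ec : Nat) : List (Nat × Nat) :=
  (List.range' (sr+1) (er - (sr+1))).flatMap (fun r =>
    (List.range' (sc+1) (ec - (sc+1))).map (fun c => (r, c)))

theorem mem_rectPairs (sr er sc ec : Nat) (p : Nat × Nat) (h : p ∈ rectPairs sr er sc ec) :
    sr + 1 ≤ p.1 ∧ p.1 < er ∧ sc + 1 ≤ p.2 ∧ p.2 < ec := by
  unfold rectPairs at h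
  rw [List.mem_flatMap] at h
  obtain ⟨r, hr, hp⟩ := h
  rw [List.mem_map] at hp
  obtain ⟨c, hc, rfl⟩ := hp
  rw [List.mem_range'] at hr hc
  obtain ⟨k1, hk1, e1⟩ := hr
  obtain ⟨k2, hk2, e2⟩ := hc
  simp only
  omega

theorem fillA_eq_foldl (g : List (List Int)) (sr er sc ec : Nat) (v : Int) :
    fillA g sr er sc ec v = (rectPairs sr er sc ec).foldl (fun g p => setA g p.1 p.2 v) g := by
  unfold fillA rectPairs
  rw [List.foldl_flatMap]
  congr 1
  funext acc r
  rw [List.foldl_map]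

-- range(a, b) over nat-cast bounds is the cast of range'
theorem pyRange_natCast (a b : Nat) :
    PySem.List.pyRange (a : Int) (b : Int) 1 = (List.range' a (b - a)).map (fun k : Nat => (k : Int)) := by
  rw [PySem.List.pyRange_one]
  have h1 : ((b : Int) - (a : Int)).toNat = b - a := by omega
  rw [h1, List.range'_eq_map_range, List.map_map]
  apply List.map_congr_left
  intro k _
  simp only [Function.comp_apply]
  push_cast
  ring

-- B's fill rectangle is the cast of rectPairs
theorem pairs_cast (sr er sc ec : Nat) :
    (PySem.List.pyRange ((sr + 1 : Nat) : Int) ((er : Nat) : Int) 1).flatMap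
        (fun r => (PySem.List.pyRange ((sc + 1 : Nat) : Int) ((ec : Nat) : Int) 1).map (fun c => (r, c)))
      = (rectPairs sr er sc ec).map (fun p => ((p.1 : Int), (p.2 : Int))) := by
  rw [pyRange_natCast, pyRange_natCast]
  unfold rectPairs
  rw [List.map_flatMap, List.flatMap_map]
  apply List.flatMap_congr
  intro r _
  rw [List.map_map, List.map_map]
  rfl


-- lookups through a batch of constant inserts
theorem get?_foldl_insert_const (v : Int) :
    ∀ (L : List (Int × Int)) (d : PySem.Dict (Int × Int) Int) (q : Int × Int),
    (L.foldl (fun d p => d.insert p v) d).get? q = if q ∈ L then some v else d.get? q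
  | [], d, q => by simp
  | p :: L, d, q => by
    simp only [List.foldl_cons, get?_foldl_insert_const v L _ q, List.mem_cons]
    by_cases h1 : q ∈ L
    · rw [if_pos h1, if_pos (Or.inr h1)]
    · rw [if_neg h1, PySem.Dict.get?_insert]
      by_cases h2 : q = p
      · rw [if_pos h2, if_pos (Or.inl h2)]
      · rw [if_neg h2, if_neg (by tauto)]

theorem blkB_foldl_insert (grid : List (List Int)) (v : Int) (L : List (Int × Int))
    (d : PySem.Dict (Int × Int) Int) (r j : Nat) :
    blkB grid (L.foldl (fun d p => d.insert p v) d) r j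
      = (blkB grid d r j || decide (((r : Int), (j : Int)) ∈ L)) := by
  unfold blkB
  rw [get?_foldl_insert_const]
  by_cases h : ((r : Int), (j : Int)) ∈ L
  · simp [h]
  · simp [h]

-- the per-line set update B performs for one written cell (f = added coordinate, g = line index)
def lineUpd (f g : Int × Int → Int) (cb : List (PySem.Set Int)) (q : Int × Int) :
    List (PySem.Set Int) :=
  cb.set (g q).toNat (PySem.Set.add (cb.getD (g q).toNat []) (f q))

theorem getD_set' (cb : List (PySem.Set Int)) (k : Nat) (s : PySem.Set Int) (j : Nat)
    (hk : k < cb.length) :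
    (cb.set k s).getD j [] = if j = k then s else cb.getD j [] := by
  rw [List.getD_eq_getElem?_getD, List.getD_eq_getElem?_getD]
  by_cases h : j = k
  · subst h
    rw [List.getElem?_set_self hk]
    simp
  · rw [List.getElem?_set_ne (by omega)]
    simp [h]

theorem length_foldl_lineUpd (f g : Int × Int → Int) :
    ∀ (L : List (Int × Int)) (cb : List (PySem.Set Int)),
    (L.foldl (lineUpd f g) cb).length = cb.length
  | [], cb => rfl
  | q :: L, cb => by
    simp only [List.foldl_cons]
    rw [length_foldl_lineUpd f g L]
    simp [lineUpd]

theorem mem_foldl_lineUpd (f g : Int × Int → Int) :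
    ∀ (L : List (Int × Int)) (cb : List (PySem.Set Int)) (j : Nat) (x : Int),
    (∀ q ∈ L, 0 ≤ g q ∧ (g q).toNat < cb.length) →
    (x ∈ (L.foldl (lineUpd f g) cb).getD j [] ↔
      x ∈ cb.getD j [] ∨ ∃ q ∈ L, g q = (j : Int) ∧ x = f q)
  | [], cb, j, x, _ => by simp
  | q :: L, cb, j, x, hL => by
    have hq := hL q List.mem_cons_self
    simp only [List.foldl_cons]
    rw [mem_foldl_lineUpd f g L (lineUpd f g cb q) j x
      (by intro q' hq'; rw [lineUpd, List.length_set]; exact hL q' (List.mem_cons_of_mem _ hq'))]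
    unfold lineUpd
    rw [getD_set' _ _ _ _ hq.2]
    by_cases h : j = (g q).toNat
    · have hgj : g q = (j : Int) := by omega
      rw [if_pos h, PySem.Set.mem_add]
      subst h
      simp only [List.mem_cons]
      constructor
      · rintro ((hx | rfl) | ⟨q', hq', hgq', rfl⟩)
        · exact Or.inl hx
        · exact Or.inr ⟨q, Or.inl rfl, hgj, rfl⟩
        · exact Or.inr ⟨q', Or.inr hq', hgq', rfl⟩
      · rintro (hx | ⟨q', (rfl | hq'), hgq', rfl⟩)
        · exact Or.inl (Or.inl hx)
        · exact Or.inl (Or.inr rfl)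
        · exact Or.inr ⟨q', hq', hgq', rfl⟩
    · have hgj : ¬ g q = (j : Int) := by omega
      rw [if_neg h]
      simp only [List.mem_cons]
      constructor
      · rintro (hx | ⟨q', hq', hgq', rfl⟩)
        · exact Or.inl hx
        · exact Or.inr ⟨q', Or.inr hq', hgq', rfl⟩
      · rintro (hx | ⟨q', (rfl | hq'), hgq', rfl⟩)
        · exact Or.inl hx
        · exact absurd hgq' hgj
        · exact Or.inr ⟨q', hq', hgq', rfl⟩

-- B's one-fill fold, split into its three independent components
theorem foldl_fillCell_split (v : Int) :
    ∀ (L : List (Int × Int))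
      (st : PySem.Dict (Int × Int) Int × List (PySem.Set Int) × List (PySem.Set Int)),
    L.foldl (fun st q => fillCell v st q.1 q.2) st =
      (L.foldl (fun d q => d.insert q v) st.1,
       L.foldl (lineUpd Prod.fst Prod.snd) st.2.1,
       L.foldl (lineUpd Prod.snd Prod.fst) st.2.2)
  | [], st => rfl
  | q :: L, st => by
    simp only [List.foldl_cons]
    rw [foldl_fillCell_split v L]
    rfl

-- a batch of dict inserts = the same batch of in-place writes, through the overlay
theorem ovApply_foldl_insert (grid : List (List Int)) (v : Int) :
    ∀ (ls : List (Nat × Nat)) (d : PySem.Dict (Int × Int) Int),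
    (∀ p ∈ ls, p.1 < grid.length ∧ p.2 < (grid.getD p.1 []).length) →
    ovApply grid (ls.foldl (fun d p => d.insert ((p.1 : Int), (p.2 : Int)) v) d)
      = ls.foldl (fun g p => setA g p.1 p.2 v) (ovApply grid d)
  | [], d, _ => rfl
  | p :: ls, d, hmem => by
    simp only [List.foldl_cons]
    rw [ovApply_foldl_insert grid v ls (d.insert ((p.1 : Int), (p.2 : Int)) v)
      (fun q hq => hmem q (List.mem_cons_of_mem _ hq))]
    congr 1
    have h := hmem p List.mem_cons_self
    exact ovApply_insert grid d p.1 p.2 v h.1 h.2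

-- ---- parity of a nonnegative Int difference ----
theorem int_mod_two_cast (a b : Nat) (h : a ≤ b) :
    (PySem.Int.mod ((b : Int) - (a : Int)) 2 = 0) ↔ ((b - a) % 2 = 0) := by
  have e : (b : Int) - (a : Int) = ((b - a : Nat) : Int) := by omega
  rw [e, show (2 : Int) = ((2 : Nat) : Int) from rfl, PySem.Int.mod_natCast]
  omega

-- ---- invariants through one fill ----

theorem InvF_fill (grid : List (List Int)) (cols : Nat) (d : PySem.Dict (Int × Int) Int)
    (v : Int) (hv : v ≠ 1) (sr er sc ec : Nat) (her : er < grid.length) (hec : ec < cols)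
    (hF : InvF grid cols d) :
    InvF grid cols
      (((rectPairs sr er sc ec).map (fun p => ((p.1 : Int), (p.2 : Int)))).foldl
        (fun d q => d.insert q v) d) := by
  intro q w hq
  rw [get?_foldl_insert_const] at hq
  by_cases h : q ∈ (rectPairs sr er sc ec).map (fun p => ((p.1 : Int), (p.2 : Int)))
  · rw [if_pos h] at hq
    rw [List.mem_map] at h
    obtain ⟨p, hp, rfl⟩ := h
    have hb := mem_rectPairs _ _ _ _ p hp
    have hw : w = v := by injection hq with h'; omega
    subst hw
    exact ⟨⟨p.1, p.2, rfl, by omega, by omega⟩, hv⟩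
  · rw [if_neg h] at hq
    exact hF q w hq

theorem ColInv_fill (grid : List (List Int)) (cols : Nat) (d : PySem.Dict (Int × Int) Int)
    (cb : List (PySem.Set Int)) (v : Int) (sr er sc ec : Nat)
    (her : er < grid.length) (hec : ec < cols)
    (hC : ColInv grid cols d cb) :
    ColInv grid cols
      (((rectPairs sr er sc ec).map (fun p => ((p.1 : Int), (p.2 : Int)))).foldl
        (fun d q => d.insert q v) d)
      (((rectPairs sr er sc ec).map (fun p => ((p.1 : Int), (p.2 : Int)))).foldl
        (lineUpd Prod.fst Prod.snd) cb) := by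
  obtain ⟨hlen, hmem⟩ := hC
  constructor
  · rw [length_foldl_lineUpd]; exact hlen
  · intro j hj x
    rw [mem_foldl_lineUpd _ _ _ _ _ _ ?hbound]
    case hbound =>
      intro q hq
      rw [List.mem_map] at hq
      obtain ⟨p, hp, rfl⟩ := hq
      have hb := mem_rectPairs _ _ _ _ p hp
      refine ⟨by positivity, ?_⟩
      rw [Int.toNat_natCast, hlen]
      omega
    rw [hmem j hj x]
    constructor
    · rintro ((rfl | rfl | ⟨r, hr, rfl, hblk⟩) | ⟨q, hq, hq2, rfl⟩)
      · exact Or.inl rfl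
      · exact Or.inr (Or.inl rfl)
      · refine Or.inr (Or.inr ⟨r, hr, rfl, ?_⟩)
        rw [blkB_foldl_insert, hblk, Bool.true_or]
      · rw [List.mem_map] at hq
        obtain ⟨p, hp, rfl⟩ := hq
        have hb := mem_rectPairs _ _ _ _ p hp
        have hpj : p.2 = j := by
          have : (p.2 : Int) = (j : Int) := hq2
          exact_mod_cast this
        refine Or.inr (Or.inr ⟨p.1, by omega, rfl, ?_⟩)
        rw [blkB_foldl_insert, Bool.or_eq_true]
        right
        rw [decide_eq_true_eq, List.mem_map]
        exact ⟨p, hp, by rw [hpj]⟩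
    · rintro (rfl | rfl | ⟨r, hr, rfl, hblk⟩)
      · exact Or.inl (Or.inl rfl)
      · exact Or.inl (Or.inr (Or.inl rfl))
      · rw [blkB_foldl_insert, Bool.or_eq_true, decide_eq_true_eq] at hblk
        rcases hblk with hblk | hmemL
        · exact Or.inl (Or.inr (Or.inr ⟨r, hr, rfl, hblk⟩))
        · exact Or.inr ⟨((r : Int), (j : Int)), hmemL, rfl, rfl⟩

theorem RowInv_fill (grid : List (List Int)) (cols : Nat) (d : PySem.Dict (Int × Int) Int)
    (rb : List (PySem.Set Int)) (v : Int) (sr er sc ec : Nat)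
    (her : er < grid.length) (hec : ec < cols)
    (hR : RowInv grid cols d rb) :
    RowInv grid cols
      (((rectPairs sr er sc ec).map (fun p => ((p.1 : Int), (p.2 : Int)))).foldl
        (fun d q => d.insert q v) d)
      (((rectPairs sr er sc ec).map (fun p => ((p.1 : Int), (p.2 : Int)))).foldl
        (lineUpd Prod.snd Prod.fst) rb) := by
  obtain ⟨hlen, hmem⟩ := hR
  constructor
  · rw [length_foldl_lineUpd]; exact hlen
  · intro i hi x
    rw [mem_foldl_lineUpd _ _ _ _ _ _ ?hbound]
    case hbound =>
      intro q hq
      rw [List.mem_map] at hq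
      obtain ⟨p, hp, rfl⟩ := hq
      have hb := mem_rectPairs _ _ _ _ p hp
      refine ⟨by positivity, ?_⟩
      rw [Int.toNat_natCast, hlen]
      omega
    rw [hmem i hi x]
    constructor
    · rintro ((rfl | rfl | ⟨c, hc, rfl, hblk⟩) | ⟨q, hq, hq1, rfl⟩)
      · exact Or.inl rfl
      · exact Or.inr (Or.inl rfl)
      · refine Or.inr (Or.inr ⟨c, hc, rfl, ?_⟩)
        rw [blkB_foldl_insert, hblk, Bool.true_or]
      · rw [List.mem_map] at hq
        obtain ⟨p, hp, rfl⟩ := hq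
        have hb := mem_rectPairs _ _ _ _ p hp
        have hpi : p.1 = i := by
          have : (p.1 : Int) = (i : Int) := hq1
          exact_mod_cast this
        refine Or.inr (Or.inr ⟨p.2, by omega, rfl, ?_⟩)
        rw [blkB_foldl_insert, Bool.or_eq_true]
        right
        rw [decide_eq_true_eq, List.mem_map]
        exact ⟨p, hp, by rw [hpi]⟩
    · rintro (rfl | rfl | ⟨c, hc, rfl, hblk⟩)
      · exact Or.inl (Or.inl rfl)
      · exact Or.inl (Or.inr (Or.inl rfl))
      · rw [blkB_foldl_insert, Bool.or_eq_true, decide_eq_true_eq] at hblk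
        rcases hblk with hblk | hmemL
        · exact Or.inl (Or.inr (Or.inr ⟨c, hc, rfl, hblk⟩))
        · exact Or.inr ⟨((i : Int), (c : Int)), hmemL, rfl, rfl⟩

-- ---- one scan step preserves the simulation relation ----

def RelAB (grid : List (List Int)) (cols : Nat) (g : List (List Int))
    (st : PySem.Dict (Int × Int) Int × List (PySem.Set Int) × List (PySem.Set Int)) : Prop :=
  g = ovApply grid st.1 ∧ InvF grid cols st.1 ∧ ColInv grid cols st.1 st.2.1 ∧
    RowInv grid cols st.1 st.2.2

theorem step_bridge (grid : List (List Int)) (cols : Nat)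
    (hw : ∀ r ∈ grid, cols ≤ r.length)
    (st : PySem.Dict (Int × Int) Int × List (PySem.Set Int) × List (PySem.Set Int))
    (i j : Nat) (hi : i < grid.length) (hj : j < cols)
    (h : RelAB grid cols (ovApply grid st.1) st) :
    RelAB grid cols (stepA grid.length cols (ovApply grid st.1) i j) (stepB grid st i j) := by
  obtain ⟨-, hF, hC, hR⟩ := h
  have hcells : ∀ a b : Nat, a < grid.length → b < cols →
      (cellA (ovApply grid st.1) a b == 1) = !(blkB grid st.1 a b) :=
    fun a b ha hb => cell_iff grid cols st.1 hw hF a b ha hb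
  by_cases hb : (cellA grid i j == 1 && (st.1.get? ((i : Int), (j : Int))).isNone) = true
  · have hA : (cellA (ovApply grid st.1) i j == 1) = true := by
      rw [hcells i j hi hj]
      unfold blkB
      rw [hb]
      rfl
    have HmemC : ∀ x : Int, x ∈ st.2.1.getD j [] ↔ x = -1 ∨ x = (grid.length : Int) ∨
        ∃ r : Nat, r < grid.length ∧ x = (r : Int) ∧
          (cellA (ovApply grid st.1) r j == 1) = false := by
      intro x
      rw [hC.2 j hj x]
      refine or_congr Iff.rfl (or_congr Iff.rfl ?_)
      constructor
      · rintro ⟨r, hr, rfl, hblk⟩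
        exact ⟨r, hr, rfl, by rw [hcells r j hr hj, hblk]; rfl⟩
      · rintro ⟨r, hr, rfl, hp⟩
        refine ⟨r, hr, rfl, ?_⟩
        have h2 := hcells r j hr hj
        rw [hp] at h2
        cases hbb : blkB grid st.1 r j
        · rw [hbb] at h2; cases h2
        · rfl
    have HmemR : ∀ x : Int, x ∈ st.2.2.getD i [] ↔ x = -1 ∨ x = (cols : Int) ∨
        ∃ c : Nat, c < cols ∧ x = (c : Int) ∧
          (cellA (ovApply grid st.1) i c == 1) = false := by
      intro x
      rw [hR.2 i hi x]
      refine or_congr Iff.rfl (or_congr Iff.rfl ?_)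
      constructor
      · rintro ⟨c, hc, rfl, hblk⟩
        exact ⟨c, hc, rfl, by rw [hcells i c hi hc, hblk]; rfl⟩
      · rintro ⟨c, hc, rfl, hp⟩
        refine ⟨c, hc, rfl, ?_⟩
        have h2 := hcells i c hi hc
        rw [hp] at h2
        cases hbb : blkB grid st.1 i c
        · rw [hbb] at h2; cases h2
        · rfl
    have hsr' : predMax (st.2.1.getD j []) (i : Int) + 1
        = ((walkUp (fun r => cellA (ovApply grid st.1) r j == 1) i : Nat) : Int) := by
      rw [predMax_eq _ _ grid.length i HmemC hi]; ring
    have her' : succMin (st.2.1.getD j []) (i : Int) - 1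
        = ((walkDown (fun r => cellA (ovApply grid st.1) r j == 1)
            (grid.length - 1 - i) i : Nat) : Int) := by
      rw [succMin_eq _ _ grid.length i HmemC hi]; ring
    have hsc' : predMax (st.2.2.getD i []) (j : Int) + 1
        = ((walkUp (fun c => cellA (ovApply grid st.1) i c == 1) j : Nat) : Int) := by
      rw [predMax_eq _ _ cols j HmemR hj]; ring
    have hec' : succMin (st.2.2.getD i []) (j : Int) - 1
        = ((walkDown (fun c => cellA (ovApply grid st.1) i c == 1)
            (cols - 1 - j) j : Nat) : Int) := by
      rw [succMin_eq _ _ cols j HmemR hj]; ring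
    obtain ⟨srN, hsrN⟩ :
        ∃ y, walkUp (fun r => cellA (ovApply grid st.1) r j == 1) i = y := ⟨_, rfl⟩
    obtain ⟨erN, herN⟩ :
        ∃ y, walkDown (fun r => cellA (ovApply grid st.1) r j == 1)
          (grid.length - 1 - i) i = y := ⟨_, rfl⟩
    obtain ⟨scN, hscN⟩ :
        ∃ y, walkUp (fun c => cellA (ovApply grid st.1) i c == 1) j = y := ⟨_, rfl⟩
    obtain ⟨ecN, hecN⟩ :
        ∃ y, walkDown (fun c => cellA (ovApply grid st.1) i c == 1)
          (cols - 1 - j) j = y := ⟨_, rfl⟩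
    rw [hsrN] at hsr'
    rw [herN] at her'
    rw [hscN] at hsc'
    rw [hecN] at hec'
    have hsrle : srN ≤ i := hsrN ▸ walkUp_le _ i
    have herge : i ≤ erN := herN ▸ walkDown_ge _ (grid.length - 1 - i) i
    have herlt : erN < grid.length := by
      have := herN ▸ walkDown_le (fun r => cellA (ovApply grid st.1) r j == 1)
        (grid.length - 1 - i) i
      omega
    have hscle : scN ≤ j := hscN ▸ walkUp_le _ j
    have hecge : j ≤ ecN := hecN ▸ walkDown_ge _ (cols - 1 - j) j
    have heclt : ecN < cols := by
      have := hecN ▸ walkDown_le (fun c => cellA (ovApply grid st.1) i c == 1)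
        (cols - 1 - j) j
      omega
    by_cases hfill : 1 < erN - srN ∧ 1 < ecN - scN
    · have hfillI : 1 < (erN : Int) - (srN : Int) ∧ 1 < (ecN : Int) - (scN : Int) := by
        constructor <;> omega
      have hparity : (PySem.Int.mod ((erN : Int) - (srN : Int)) 2 = 0 ∧
          PySem.Int.mod ((ecN : Int) - (scN : Int)) 2 = 0) ↔
          ((erN - srN) % 2 = 0 ∧ (ecN - scN) % 2 = 0) :=
        and_congr (int_mod_two_cast srN erN (by omega)) (int_mod_two_cast scN ecN (by omega))
      have hv : (if PySem.Int.mod ((erN : Int) - (srN : Int)) 2 = 0 ∧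
          PySem.Int.mod ((ecN : Int) - (scN : Int)) 2 = 0 then (7 : Int) else 2)
          = (if (erN - srN) % 2 = 0 ∧ (ecN - scN) % 2 = 0 then (7 : Int) else 2) :=
        if_congr hparity rfl rfl
      have hv1 : (if (erN - srN) % 2 = 0 ∧ (ecN - scN) % 2 = 0 then (7 : Int) else 2) ≠ 1 := by
        split <;> omega
      have e1 : (srN : Int) + 1 = ((srN + 1 : Nat) : Int) := by push_cast; ring
      have e2 : (scN : Int) + 1 = ((scN + 1 : Nat) : Int) := by push_cast; ring
      have hAu : stepA grid.length cols (ovApply grid st.1) i j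
          = fillA (ovApply grid st.1) srN erN scN ecN
              (if (erN - srN) % 2 = 0 ∧ (ecN - scN) % 2 = 0 then 7 else 2) := by
        simp only [stepA]
        rw [if_pos hA, hsrN, herN, hscN, hecN, if_pos hfill]
      have hBu : stepB grid st i j
          = ((rectPairs srN erN scN ecN).map (fun p => ((p.1 : Int), (p.2 : Int)))).foldl
              (fun st q => fillCell
                (if (erN - srN) % 2 = 0 ∧ (ecN - scN) % 2 = 0 then (7 : Int) else 2)
                st q.1 q.2) st := by
        simp only [stepB]
        rw [if_pos hb, hsr', her', hsc', hec', if_pos hfillI, hv, e1, e2, ← pairs_cast,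
          List.foldl_flatMap]
        congr 1
        funext st' r
        rw [List.foldl_map]
      rw [hAu, hBu, foldl_fillCell_split]
      have hrange : ∀ p ∈ rectPairs srN erN scN ecN,
          p.1 < grid.length ∧ p.2 < (grid.getD p.1 []).length := by
        intro p hp
        have hbp := mem_rectPairs _ _ _ _ p hp
        have h1 : p.1 < grid.length := by omega
        exact ⟨h1, lt_of_lt_of_le (by omega : p.2 < cols)
          (hw _ (mem_getD_of_lt grid p.1 h1))⟩
      refine ⟨?_,
        InvF_fill grid cols st.1 _ hv1 srN erN scN ecN herlt heclt hF,
        ColInv_fill grid cols st.1 st.2.1 _ srN erN scN ecN herlt heclt hC,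
        RowInv_fill grid cols st.1 st.2.2 _ srN erN scN ecN herlt heclt hR⟩
      rw [List.foldl_map, fillA_eq_foldl,
        ovApply_foldl_insert grid _ (rectPairs srN erN scN ecN) st.1 hrange]
    · have hfillI : ¬(1 < (erN : Int) - (srN : Int) ∧ 1 < (ecN : Int) - (scN : Int)) := by
        rintro ⟨h1, h2⟩
        exact hfill ⟨by omega, by omega⟩
      have hAu : stepA grid.length cols (ovApply grid st.1) i j = ovApply grid st.1 := by
        simp only [stepA]
        rw [if_pos hA, hsrN, herN, hscN, hecN, if_neg hfill]
      have hBu : stepB grid st i j = st := by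
        simp only [stepB]
        rw [if_pos hb, hsr', her', hsc', hec', if_neg hfillI]
      rw [hAu, hBu]
      exact ⟨rfl, hF, hC, hR⟩
  · have hA : ¬((cellA (ovApply grid st.1) i j == 1) = true) := by
      rw [hcells i j hi hj]
      unfold blkB
      rw [Bool.eq_false_iff.mpr hb]
      simp
    have hAu : stepA grid.length cols (ovApply grid st.1) i j = ovApply grid st.1 := by
      simp only [stepA]
      rw [if_neg hA]
    have hBu : stepB grid st i j = st := by
      simp only [stepB]
      rw [if_neg hb]
    rw [hAu, hBu]
    exact ⟨rfl, hF, hC, hR⟩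

-- ---- the whole scan preserves the relation ----

theorem loop_bridge (grid : List (List Int)) (cols : Nat)
    (hw : ∀ r ∈ grid, cols ≤ r.length) :
    ∀ (ps : List (Nat × Nat))
      (st : PySem.Dict (Int × Int) Int × List (PySem.Set Int) × List (PySem.Set Int)),
    (∀ p ∈ ps, p.1 < grid.length ∧ p.2 < cols) →
    RelAB grid cols (ovApply grid st.1) st →
    RelAB grid cols
      (ps.foldl (fun g p => stepA grid.length cols g p.1 p.2) (ovApply grid st.1))
      (ps.foldl (fun st p => stepB grid st p.1 p.2) st)
  | [], st, _, h => h
  | p :: ps, st, hmem, h => by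
    have hp := hmem p List.mem_cons_self
    have hstep := step_bridge grid cols hw st p.1 p.2 hp.1 hp.2 h
    simp only [List.foldl_cons]
    have h1 := hstep.1
    rw [h1]
    rw [h1] at hstep
    exact loop_bridge grid cols hw ps (stepB grid st p.1 p.2)
      (fun q hq => hmem q (List.mem_cons_of_mem _ hq)) hstep

-- ---- initial state ----

theorem ovApply_empty (grid : List (List Int)) :
    ovApply grid (PySem.Dict.empty : PySem.Dict (Int × Int) Int) = grid := by
  apply List.ext_getElem?
  intro n
  rw [getElem?_ovApply]
  cases hg : grid[n]? with
  | none => rfl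
  | some row =>
    rw [Option.map_some, Option.some_inj]
    apply List.ext_getElem?
    intro m
    rw [List.getElem?_mapIdx]
    cases hr : row[m]? with
    | none => rfl
    | some x =>
      rw [Option.map_some, Option.some_inj, PySem.Dict.getD_eq_get?_getD,
        PySem.Dict.get?_empty]
      rfl

theorem InvF_empty (grid : List (List Int)) (cols : Nat) :
    InvF grid cols (PySem.Dict.empty : PySem.Dict (Int × Int) Int) := by
  intro p v h
  rw [PySem.Dict.get?_empty] at h
  cases h

theorem blkB_empty (grid : List (List Int)) (r j : Nat) :
    blkB grid (PySem.Dict.empty : PySem.Dict (Int × Int) Int) r j = !(cellA grid r j == 1) := by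
  unfold blkB
  rw [PySem.Dict.get?_empty]
  simp

theorem getD_map_range' {b : Type} [Inhabited b] (f : Nat → b) (n j : Nat) (hj : j < n)
    (dflt : b) : ((List.range n).map f).getD j dflt = f j := by
  rw [getD_eq_getElem' _ _ _ (by simpa using hj)]
  simp

theorem ColInv_init (grid : List (List Int)) (cols : Nat) :
    ColInv grid cols PySem.Dict.empty (colBlocked grid grid.length cols) := by
  constructor
  · simp [colBlocked]
  · intro j hj x
    unfold colBlocked
    rw [getD_map_range' _ cols j hj]
    rw [PySem.Set.mem_union, PySem.Set.mem_ofList, PySem.Set.mem_ofList]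
    simp only [List.mem_cons, List.mem_map, List.mem_filter,
      List.mem_range, List.not_mem_nil, or_false, blkB_empty]
    constructor
    · rintro ((rfl | rfl) | ⟨r, ⟨hr, hcell⟩, rfl⟩)
      · exact Or.inl rfl
      · exact Or.inr (Or.inl rfl)
      · exact Or.inr (Or.inr ⟨r, hr, rfl, hcell⟩)
    · rintro (rfl | rfl | ⟨r, hr, rfl, hcell⟩)
      · exact Or.inl (Or.inl rfl)
      · exact Or.inl (Or.inr rfl)
      · exact Or.inr ⟨r, ⟨hr, hcell⟩, rfl⟩

theorem RowInv_init (grid : List (List Int)) (cols : Nat) :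
    RowInv grid cols PySem.Dict.empty (rowBlocked grid grid.length cols) := by
  constructor
  · simp [rowBlocked]
  · intro i hi x
    unfold rowBlocked
    rw [getD_map_range' _ grid.length i hi]
    rw [PySem.Set.mem_union, PySem.Set.mem_ofList, PySem.Set.mem_ofList]
    simp only [List.mem_cons, List.mem_map, List.mem_filter,
      List.mem_range, List.not_mem_nil, or_false, blkB_empty]
    constructor
    · rintro ((rfl | rfl) | ⟨c, ⟨hc, hcell⟩, rfl⟩)
      · exact Or.inl rfl
      · exact Or.inr (Or.inl rfl)
      · exact Or.inr (Or.inr ⟨c, hc, rfl, hcell⟩)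
    · rintro (rfl | rfl | ⟨c, hc, rfl, hcell⟩)
      · exact Or.inl (Or.inl rfl)
      · exact Or.inl (Or.inr rfl)
      · exact Or.inr ⟨c, ⟨hc, hcell⟩, rfl⟩

-- ---- flattening the two double loops ----

def allPos (rows cols : Nat) : List (Nat × Nat) :=
  (List.range rows).flatMap (fun i => (List.range cols).map (fun j => (i, j)))

theorem mem_allPos (rows cols : Nat) (p : Nat × Nat) (h : p ∈ allPos rows cols) :
    p.1 < rows ∧ p.2 < cols := by
  unfold allPos at h
  rw [List.mem_flatMap] at h
  obtain ⟨i, hi, hp⟩ := h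
  rw [List.mem_map] at hp
  obtain ⟨j, hj, rfl⟩ := hp
  rw [List.mem_range] at hi hj
  exact ⟨hi, hj⟩

theorem transform_eq_flat (grid : List (List Int)) :
    transform grid = (allPos grid.length (grid.headD []).length).foldl
      (fun g p => stepA grid.length (grid.headD []).length g p.1 p.2) grid := by
  show (List.range grid.length).foldl
      (fun g i => (List.range (grid.headD []).length).foldl
        (fun g j => stepA grid.length (grid.headD []).length g i j) g) grid = _
  unfold allPos
  rw [List.foldl_flatMap]
  congr 1
  funext g i
  rw [List.foldl_map]

theorem alt_eq_flat (grid : List (List Int))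
    (st : PySem.Dict (Int × Int) Int × List (PySem.Set Int) × List (PySem.Set Int)) :
    (List.range grid.length).foldl (fun st i =>
        (List.range (grid.headD []).length).foldl (fun st j => stepB grid st i j) st) st
      = (allPos grid.length (grid.headD []).length).foldl
          (fun st p => stepB grid st p.1 p.2) st := by
  unfold allPos
  rw [List.foldl_flatMap]
  congr 1
  funext st i
  rw [List.foldl_map]

-- ===== VERDICT (by name: the statement is the Claim_ definition above) =====
theorem transform_spec : Claim_equal_transform := by
  intro grid _ hpre
  unfold Spec_transform
  have hw : ∀ r ∈ grid, (grid.headD []).length ≤ r.length := hpre.2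
  have hinit : RelAB grid (grid.headD []).length
      (ovApply grid (PySem.Dict.empty, colBlocked grid grid.length (grid.headD []).length,
        rowBlocked grid grid.length (grid.headD []).length).1)
      (PySem.Dict.empty, colBlocked grid grid.length (grid.headD []).length,
        rowBlocked grid grid.length (grid.headD []).length) :=
    ⟨rfl, InvF_empty grid _, ColInv_init grid _, RowInv_init grid _⟩
  have hloop := loop_bridge grid (grid.headD []).length hw
    (allPos grid.length (grid.headD []).length)
    (PySem.Dict.empty, colBlocked grid grid.length (grid.headD []).length,
      rowBlocked grid grid.length (grid.headD []).length)
    (fun p hp => mem_allPos _ _ p hp) hinit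
  have h1 := hloop.1
  rw [ovApply_empty] at h1
  show transform grid = transform_alt grid
  rw [transform_eq_flat]
  simp only [transform_alt]
  rw [alt_eq_flat]
  exact h1
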